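-- pv_equiv track=rewrite | github.com/Mugamta/Boostcamp_AITech5_CV11 | 2023/05.11/최지욱_프로그래머스_괄호변환.py | solution
-- ===== SOURCE A (Python) =====
-- def solution(p):
--
--     ##############Encoding phase##############
--     arr =[]
--     for t in p:                 ## 괄호를 -1, 1로 치환
--         if t=='(':
--             arr.append(1)
--         else:
--             arr.append(-1)
--     ##########################################
--
--
--     ##############Decoding phase##############
--     string = ''
--     for num in do(arr):         ## do를 실행한 arr 리스트 decoding
--         if num==1:
--             string += '('
--         else:
--             string += ')'
--     ##########################################
--
--     return string
--
-- def split(arr):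
--     accum = 0
--     for index, i in enumerate(arr):
--         accum += i
--         if accum == 0:                      ## 여는 괄호('(')의 수보다 닫는 괄호(')')의 수가 같아지는 지점
--             break
--     return arr[:index+1], arr[index+1:]     ## 같아지는 지점에서 균형잡힌 괄호 문자열 u, v로 분리
--
-- def correct(arr):                           ## 올바른 괄호 문자열 체크
--     accum =0
--     for index, i in enumerate(arr):
--         accum += i
--         if accum <0:                        ## 여는 괄호('(')의 수보다 닫는 괄호(')')의 수가 더 많은 경우
--             return False                    ## 올바르지 않은 괄호 문자열
--
--     return True                             ## 그렇지 않은 경우 올바른 괄호 문자열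
--
-- def do(arr):
--     if arr==[]:                             ## 1. 빈 문자열인 경우
--         return []                           ##    그대로 반환
--     u, v = split(arr)                       ## 2. u,v split
--     if correct(u):                          ## 3. u가 올바른 괄호 문자열인 경우
--         return u + do(v)                    ##    3-1. u에 수행한 결과 do(v)를 이어 붙이고 반환
--     else:                                   ## 4. 문자열 u가 올바른 괄호 문자열이 아닌 경우
--         new_arr = [1] + do(v) + [-1]            ## 4-1 / 4-2 / 4-3
--         return new_arr + [-i for i in u[1:-1]]  ## 4-4 / 4-5 / (뒤집어서 붙이기)
-- ===== SOURCE B (Python) =====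
-- def solution(p):
--     # normalize: A treats every non-'(' character as ')'
--     q = ''.join(c if c == '(' else ')' for c in p)
--     # one pass: cut into segments at every balance-zero point
--     segs = []
--     cur = []
--     bal = 0
--     for c in q:
--         cur.append(c)
--         bal += 1 if c == '(' else -1
--         if bal == 0:
--             segs.append(''.join(cur))
--             cur = []
--     if cur:
--         segs.append(''.join(cur))
--     # build the answer back-to-front over the segments
--     res = ''
--     for u in reversed(segs):
--         if is_ok(u):
--             res = u + res
--         else:
--             res = '(' + res + ')' + ''.join('(' if c == ')' else ')' for c in u[1:-1])
--     return res
--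
-- def is_ok(u):
--     bal = 0
--     for c in u:
--         bal += 1 if c == '(' else -1
--         if bal < 0:
--             return False
--     return True
-- ===== Notes on version B (the rewrite author's own statement) =====
-- stated objective: alternative
-- what changed: Replaces A's int-encode/recursive split-do-recombine (which rescans and copies sublists at every recursion level) by a single left-to-right segmentation pass at balance-zero points followed by one back-to-front fold over the segments.
import Mathlib
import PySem

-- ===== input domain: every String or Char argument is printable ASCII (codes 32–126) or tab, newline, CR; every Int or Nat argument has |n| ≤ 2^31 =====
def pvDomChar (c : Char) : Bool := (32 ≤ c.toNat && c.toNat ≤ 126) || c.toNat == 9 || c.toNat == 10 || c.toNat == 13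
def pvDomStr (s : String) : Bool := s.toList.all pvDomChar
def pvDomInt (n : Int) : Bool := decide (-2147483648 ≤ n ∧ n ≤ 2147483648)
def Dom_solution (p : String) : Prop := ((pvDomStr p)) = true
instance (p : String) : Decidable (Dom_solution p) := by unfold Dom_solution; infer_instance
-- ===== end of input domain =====

-- B replaces A's int-encode + recursive split/do recombination by one segmentation pass at
-- balance-zero points and a back-to-front fold over the segments; same return value everywhere.

-- ===== PORT A =====

-- split's loop: index of the first position where the running sum hits 0,
-- or the last index if it never does (Python's `index` after a full for-loop).
def pvSplitIdx : List Int → Int → Nat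
  | [], _ => 0                        -- unreachable from pvSplit on nonempty input
  | [_], _ => 0                       -- last element: break or loop end both leave index here
  | a :: b :: rest, accum =>
      if accum + a == 0 then 0 else pvSplitIdx (b :: rest) (accum + a) + 1

def pvSplit (arr : List Int) : List Int × List Int :=
  let idx := pvSplitIdx arr 0
  (arr.take (idx + 1), arr.drop (idx + 1))

def pvCorrect : List Int → Int → Bool
  | [], _ => true
  | a :: rest, accum =>
      if accum + a < 0 then false else pvCorrect rest (accum + a)

theorem pvDo_dec (arr : List Int) (h : arr ≠ []) : (pvSplit arr).2.length < arr.length := by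
  have : 0 < arr.length := List.length_pos_iff.mpr h
  simp only [pvSplit, List.length_drop]
  omega

def pvDo (arr : List Int) : List Int :=
  if h : arr = [] then []
  else
    let u := (pvSplit arr).1
    let v := (pvSplit arr).2
    if pvCorrect u 0 then u ++ pvDo v
    else ((1 :: pvDo v) ++ [-1]) ++ (PySem.List.slice u (some 1) (some (-1))).map (fun i => -i)
termination_by arr.length
decreasing_by
  all_goals exact pvDo_dec arr h

def solution (p : String) : String :=
  -- encoding phase: '(' -> 1, everything else -> -1
  let arr := p.toList.foldl (fun acc t => acc ++ [if t = '(' then (1 : Int) else -1]) []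
  -- decoding phase: 1 -> '(', else ')'
  String.ofList ((pvDo arr).foldl (fun acc num => acc ++ [if num == 1 then '(' else ')']) [])

-- ===== PORT B =====

-- one pass: cut the (normalized) character list into segments at every balance-zero point
def altSegs : List Char → Int → List Char → List (List Char)
  | [], _, cur => if cur = [] then [] else [cur]
  | c :: rest, bal, cur =>
      let cur' := cur ++ [c]
      let b := bal + (if c = '(' then 1 else -1)
      if b == 0 then cur' :: altSegs rest b [] else altSegs rest b cur'

def altOk : List Char → Int → Bool
  | [], _ => true
  | c :: rest, bal =>
      let b := bal + (if c = '(' then 1 else -1)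
      if b < 0 then false else altOk rest b

def altFlip (l : List Char) : List Char := l.map (fun c => if c = ')' then '(' else ')')

-- build the answer back-to-front over the segments (Source B's `for u in reversed(segs)`)
def altBuild (segs : List (List Char)) : List Char :=
  segs.reverse.foldl
    (fun res u =>
      if altOk u 0 then u ++ res
      else '(' :: res ++ (')' :: altFlip (PySem.List.slice u (some 1) (some (-1))))) []

def solution_alt (p : String) : String :=
  let q := p.toList.map (fun c => if c = '(' then '(' else ')')
  String.ofList (altBuild (altSegs q 0 []))

-- ===== PRECONDITION & SPEC =====
def Spec_solution (p : String) (out : String) : Prop := out = solution_alt p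
instance (p : String) (out : String) : Decidable (Spec_solution p out) := by unfold Spec_solution; infer_instance

-- ===== CLAIM (what is proved, stated in full; the proofs are below) =====
def Claim_equal_solution : Prop := ∀ (p : String), Dom_solution p → Spec_solution p (solution p)

-- ===== LEMMAS AND PROOFS =====

-- decoding of a single code
def pvDec (n : Int) : Char := if n == 1 then '(' else ')'

theorem pv_slice_one_neg_one {α : Type} (u : List α) :
    PySem.List.slice u (some 1) (some (-1)) = u.tail.dropLast := by
  cases u with
  | nil => simp [PySem.List.slice]
  | cons a t =>
      simp [PySem.List.slice, PySem.List.clampIdx, List.dropLast_eq_take]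
      split_ifs <;> omega

theorem pv_slice_map {α β : Type} (f : α → β) (u : List α) :
    PySem.List.slice (u.map f) (some 1) (some (-1)) =
      (PySem.List.slice u (some 1) (some (-1))).map f := by
  simp [pv_slice_one_neg_one, List.map_dropLast, List.map_tail]

theorem pv_flip_dec (u : List Int) (hpm : ∀ x ∈ u, x = 1 ∨ x = -1) :
    altFlip (u.map pvDec) = (u.map (fun i => -i)).map pvDec := by
  simp only [altFlip, List.map_map]
  apply List.map_congr_left
  intro x hx
  rcases hpm x hx with h | h <;> simp [h, pvDec]

theorem pv_altOk_cons (c : Char) (rest : List Char) (bal : Int) :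
    altOk (c :: rest) bal =
      (if (bal + (if c = '(' then 1 else -1)) < 0 then false
       else altOk rest (bal + (if c = '(' then 1 else -1))) := rfl

theorem pv_ok_correct (u : List Int) (bal : Int) (hpm : ∀ x ∈ u, x = 1 ∨ x = -1) :
    altOk (u.map pvDec) bal = pvCorrect u bal := by
  induction u generalizing bal with
  | nil => rfl
  | cons a rest ih =>
      have ha : a = 1 ∨ a = -1 := hpm a (by simp)
      have hrest : ∀ x ∈ rest, x = 1 ∨ x = -1 := fun x hx => hpm x (by simp [hx])
      have hw : (if pvDec a = '(' then (1:Int) else -1) = a := by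
        rcases ha with h | h <;> simp [h, pvDec]
      rw [List.map_cons, pv_altOk_cons, hw]
      simp only [pvCorrect]
      by_cases hb : bal + a < 0
      · simp [hb]
      · simp [hb, ih _ hrest]

theorem pv_altSegs_cons (c : Char) (rest : List Char) (bal : Int) (cur : List Char) :
    altSegs (c :: rest) bal cur =
      (if (bal + (if c = '(' then 1 else -1)) == 0
       then (cur ++ [c]) :: altSegs rest (bal + (if c = '(' then 1 else -1)) []
       else altSegs rest (bal + (if c = '(' then 1 else -1)) (cur ++ [c])) := rfl

theorem pv_splitIdx_cons₂ (a b : Int) (rest : List Int) (accum : Int) :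
    pvSplitIdx (a :: b :: rest) accum =
      (if accum + a == 0 then 0 else pvSplitIdx (b :: rest) (accum + a) + 1) := rfl

theorem pv_segs_split (arr : List Int) (bal : Int) (cur : List Char)
    (hpm : ∀ x ∈ arr, x = 1 ∨ x = -1) (hne : arr ≠ []) :
    altSegs (arr.map pvDec) bal cur =
      (cur ++ (arr.take (pvSplitIdx arr bal + 1)).map pvDec) ::
        altSegs ((arr.drop (pvSplitIdx arr bal + 1)).map pvDec) 0 [] := by
  induction arr generalizing bal cur with
  | nil => exact absurd rfl hne
  | cons a rest ih =>
      have ha : a = 1 ∨ a = -1 := hpm a (by simp)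
      have hrest : ∀ x ∈ rest, x = 1 ∨ x = -1 := fun x hx => hpm x (by simp [hx])
      cases rest with
      | nil =>
          rcases ha with h | h <;> subst h <;>
            simp [altSegs, pvSplitIdx, pvDec]

      | cons b rest' =>
          have hw : (if pvDec a = '(' then (1:Int) else -1) = a := by
            rcases ha with h | h <;> simp [h, pvDec]
          rw [List.map_cons, pv_altSegs_cons, hw, pv_splitIdx_cons₂]
          by_cases h0 : (bal + a == 0) = true
          · have hba : bal + a = 0 := by simpa using h0
            rw [if_pos h0, if_pos h0, hba]
            simp [List.take_succ_cons, List.drop_succ_cons]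
          · rw [if_neg h0, if_neg h0]
            rw [ih (bal + a) (cur ++ [pvDec a]) hrest (by simp)]
            simp [List.take_succ_cons, List.drop_succ_cons, List.append_assoc]

-- the back-to-front fold peels the FIRST segment off last
theorem pv_build_cons (u : List Char) (segs : List (List Char)) :
    altBuild (u :: segs) =
      (if altOk u 0 then u ++ altBuild segs
       else '(' :: altBuild segs ++ (')' :: altFlip (PySem.List.slice u (some 1) (some (-1))))) := by
  simp [altBuild, List.foldl_append]

theorem pv_core (n : Nat) (arr : List Int) (hlen : arr.length ≤ n)
    (hpm : ∀ x ∈ arr, x = 1 ∨ x = -1) :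
    altBuild (altSegs (arr.map pvDec) 0 []) = (pvDo arr).map pvDec := by
  induction n generalizing arr with
  | zero =>
      have : arr = [] := List.length_eq_zero_iff.mp (Nat.le_zero.mp hlen)
      subst this
      simp [altSegs, altBuild, pvDo]
  | succ n ih =>
      by_cases harr : arr = []
      · subst harr; simp [altSegs, altBuild, pvDo]
      · have hpos : 0 < arr.length := List.length_pos_iff.mpr harr
        rw [pv_segs_split arr 0 [] hpm harr, pv_build_cons, List.nil_append]
        have hmemu : ∀ x ∈ arr.take (pvSplitIdx arr 0 + 1), x = 1 ∨ x = -1 :=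
          fun x hx => hpm x (List.take_subset _ _ hx)
        have hmemv : ∀ x ∈ arr.drop (pvSplitIdx arr 0 + 1), x = 1 ∨ x = -1 :=
          fun x hx => hpm x (List.drop_subset _ _ hx)
        have hih : altBuild (altSegs ((arr.drop (pvSplitIdx arr 0 + 1)).map pvDec) 0 [])
            = (pvDo (arr.drop (pvSplitIdx arr 0 + 1))).map pvDec := by
          apply ih
          · simp only [List.length_drop]; omega
          · exact hmemv
        rw [pvDo]
        simp only [harr, dite_false, pvSplit]
        rw [pv_ok_correct _ 0 hmemu, hih]
        by_cases hc : pvCorrect (arr.take (pvSplitIdx arr 0 + 1)) 0 = true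
        · simp [hc, List.map_append]
        · have hmems : ∀ x ∈ PySem.List.slice (arr.take (pvSplitIdx arr 0 + 1)) (some 1) (some (-1)),
              x = 1 ∨ x = -1 := fun x hx => hmemu x (PySem.List.mem_of_mem_slice _ _ _ hx)
          simp only [hc, if_false, Bool.false_eq_true]
          rw [pv_slice_map, pv_flip_dec _ hmems]
          simp [pvDec, List.map_append]

-- ===== VERDICT (by name: the statement is the Claim_ definition above) =====
theorem solution_spec : Claim_equal_solution := by
  intro p _
  unfold Spec_solution solution solution_alt
  simp only [PySem.List.foldl_append_singleton_eq_map, List.nil_append]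
  have hlam : (fun x : Int => if x == 1 then '(' else ')') = pvDec := by
    funext x; simp [pvDec]
  have hnorm : (p.toList.map (fun c => if c = '(' then '(' else ')'))
      = (p.toList.map (fun t => if t = '(' then (1:Int) else -1)).map pvDec := by
    simp only [List.map_map]
    apply List.map_congr_left
    intro c _
    by_cases h : c = '(' <;> simp [h, pvDec]
  have hmem : ∀ x ∈ p.toList.map (fun t => if t = '(' then (1:Int) else -1), x = 1 ∨ x = -1 := by
    intro x hx
    simp only [List.mem_map] at hx
    obtain ⟨c, _, hc⟩ := hx
    by_cases h : c = '(' <;> simp [h] at hc <;> omega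
  rw [hlam, hnorm,
    pv_core (p.toList.map (fun t => if t = '(' then (1:Int) else -1)).length _ le_rfl hmem]
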